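-- pv_equiv track=rewrite | github.com/avishek376/Scaler-Problem-Solving | Advanced/27 Advanced DSA : Queues /Homework/Q2. Perfect Numbers/Perfect Numbers.py | solve
-- ===== SOURCE A (Python) =====
-- from collections import deque
--
-- def solve(A):
--     q = deque()
--     q.append("1")
--     q.append("2")
--     ans = ""
--
--     for i in range(A):
--         if len(q)>0:
--             curr = q.popleft()
--             value1 = curr+"1"
--             value2 = curr+"2"
--             q.append(value1)
--             q.append(value2)
--             ans = curr+curr[::-1]
--     return ans
-- ===== SOURCE B (Python) =====
-- def solve(A):
--     if A <= 0:
--         return ""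
--     half = "".join("1" if b == "0" else "2" for b in bin(A + 1)[3:])
--     return half + half[::-1]
-- ===== Notes on version B (the rewrite author's own statement) =====
-- stated objective: faster
-- what changed: Replaces the BFS queue simulation (A pops, each building strings) by a closed form: the A-th node's left half is the binary expansion of A+1 without its leading bit, with 0/1 mapped to '1'/'2', then mirrored.
import Mathlib
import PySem

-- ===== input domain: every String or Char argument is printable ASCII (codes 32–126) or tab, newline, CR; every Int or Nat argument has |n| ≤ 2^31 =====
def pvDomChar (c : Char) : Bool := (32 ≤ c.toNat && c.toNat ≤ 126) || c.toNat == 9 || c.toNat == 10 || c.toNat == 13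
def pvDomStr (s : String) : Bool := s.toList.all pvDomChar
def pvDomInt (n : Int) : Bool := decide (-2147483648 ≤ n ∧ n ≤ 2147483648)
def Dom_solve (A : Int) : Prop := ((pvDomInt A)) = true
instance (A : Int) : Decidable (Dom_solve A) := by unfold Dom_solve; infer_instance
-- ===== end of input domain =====

-- B replaces A's BFS queue simulation by the closed form (binary of A+1 minus its
-- leading bit, digits mapped 0/1 ↦ '1'/'2', then mirrored): asymptotically faster.

-- ===== PORT A =====
-- loop body of A's for-loop (deque as a list: popleft = head, append = snoc);
-- curr[::-1] is exactly String reversal (PySem.Str.slice?_none_none_neg_one)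
def solveStep (st : List String × String) : List String × String :=
  if st.1.length > 0 then
    match st.1 with
    | curr :: rest =>
      let value1 := curr ++ "1"
      let value2 := curr ++ "2"
      (rest ++ [value1, value2], curr ++ String.ofList curr.toList.reverse)
    | [] => st
  else st

def solve (A : Int) : String :=
  let init : List String × String := (["1", "2"], "")
  let res := (PySem.List.pyRange 0 A 1).foldl (fun st (_ : Int) => solveStep st) init
  res.2

-- ===== PORT B =====
-- bin(n) for n ≥ 1: list of binary digit characters, most significant first
def binDigits : Nat → List Char
  | 0 => []
  | n + 1 => binDigits ((n + 1) / 2) ++ [if (n + 1) % 2 == 0 then '0' else '1']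
decreasing_by omega

def solve_alt (A : Int) : String :=
  if A ≤ 0 then ""
  else
    let half : List Char :=
      ((binDigits (A + 1).toNat).drop 1).map (fun b => if b == '0' then '1' else '2')
    String.ofList half ++ String.ofList half.reverse

-- ===== PRECONDITION & SPEC =====
def Spec_solve (A : Int) (out : String) : Prop := out = solve_alt A
instance (A : Int) (out : String) : Decidable (Spec_solve A out) := by unfold Spec_solve; infer_instance

-- ===== CLAIM (what is proved, stated in full; the proofs are below) =====
def Claim_equal_solve : Prop := ∀ (A : Int), Dom_solve A → Spec_solve A (solve A)

-- ===== LEMMAS AND PROOFS =====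

-- the BFS tree label at heap index m (m ≥ 1): path from root, '1' = left, '2' = right
def lab : Nat → List Char
  | 0 => []
  | 1 => []
  | n + 2 => lab ((n + 2) / 2) ++ [if (n + 2) % 2 == 0 then '1' else '2']
decreasing_by omega

theorem mk_append (a b : List Char) : String.ofList a ++ String.ofList b = String.ofList (a ++ b) := by simp

theorem toList_mk (a : List Char) : (String.ofList a).toList = a := by simp

theorem range'_concat_one (a n : Nat) : List.range' a (n + 1) = List.range' a n ++ [a + n] := by
  have := List.range'_concat (s := a) (n := n) (step := 1)
  simpa using this

theorem foldl_const {α : Type} (f : α → α) :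
    ∀ (l : List Int) (init : α), l.foldl (fun st (_ : Int) => f st) init = f^[l.length] init := by
  intro l
  induction l with
  | nil => intro init; simp
  | cons x xs ih => intro init; simp [List.foldl, ih, Function.iterate_succ_apply]

theorem lab_double (n : Nat) : lab (2 * (n + 2)) = lab (n + 2) ++ ['1'] := by
  have h : 2 * (n + 2) = (2 * n + 2) + 2 := by omega
  rw [h, lab]
  have h2 : ((2 * n + 2) + 2) / 2 = n + 2 := by omega
  have h3 : ((2 * n + 2) + 2) % 2 = 0 := by omega
  simp [h2, h3]

theorem lab_double_succ (n : Nat) : lab (2 * (n + 2) + 1) = lab (n + 2) ++ ['2'] := by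
  have h : 2 * (n + 2) + 1 = (2 * n + 3) + 2 := by omega
  rw [h, lab]
  have h2 : ((2 * n + 3) + 2) / 2 = n + 2 := by omega
  have h3 : ((2 * n + 3) + 2) % 2 = 1 := by omega
  simp [h2, h3]

-- invariant: after n loop iterations, the queue holds labels of heap indices n+2 … 2n+3,
-- and ans is the palindrome of the label at index n+1 (for n ≥ 1)
def ansOf : Nat → String
  | 0 => ""
  | n + 1 => String.ofList (lab (n + 2)) ++ String.ofList (lab (n + 2)).reverse

theorem iter_state (n : Nat) :
    solveStep^[n] (["1", "2"], "") =
      ((List.range' (n + 2) (n + 2)).map (fun m => String.ofList (lab m)), ansOf n) := by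
  induction n with
  | zero =>
    simp only [Function.iterate_zero, id_eq]
    have h2 : List.range' 2 2 = [2, 3] := by decide
    rw [h2]
    have l2 : String.ofList (lab 2) = "1" := by simp [lab]
    have l3 : String.ofList (lab 3) = "2" := by simp [lab]
    simp [l2, l3, ansOf]
  | succ n ih =>
    rw [Function.iterate_succ_apply', ih]
    have hcons : List.range' (n + 2) (n + 2) = (n + 2) :: List.range' (n + 3) (n + 1) := by
      rw [List.range'_succ]
    rw [hcons]
    simp only [List.map_cons, solveStep]
    simp only [List.length_cons]
    rw [if_pos (by omega)]
    have hrange : List.range' (n + 3) (n + 3) =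
        List.range' (n + 3) (n + 1) ++ [2 * (n + 2), 2 * (n + 2) + 1] := by
      rw [range'_concat_one, range'_concat_one]
      simp
      constructor <;> omega
    rw [hrange]
    simp only [List.map_append, List.map_cons, List.map_nil, Prod.mk.injEq]
    refine ⟨?_, ?_⟩
    · congr 1
      rw [lab_double, lab_double_succ]
      show [String.ofList (lab (n+2)) ++ "1", String.ofList (lab (n+2)) ++ "2"] = _
      rw [show ("1" : String) = String.ofList ['1'] from rfl, show ("2" : String) = String.ofList ['2'] from rfl]
      rw [mk_append, mk_append]
    · show String.ofList (lab (n + 2)) ++ String.ofList (String.ofList (lab (n + 2))).toList.reverse = ansOf (n + 1)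
      rw [toList_mk, ansOf]

-- the label equals binary(m) without its leading bit, digits mapped 0/1 ↦ '1'/'2'
theorem binDigits_ne_nil (m : Nat) (hm : 1 ≤ m) : binDigits m ≠ [] := by
  match m, hm with
  | n + 1, _ => rw [binDigits]; simp

theorem lab_eq_binDigits (m : Nat) (hm : 1 ≤ m) :
    lab m = ((binDigits m).drop 1).map (fun b => if b == '0' then '1' else '2') := by
  induction m using Nat.strong_induction_on with
  | _ m ih =>
    match m, hm with
    | 1, _ => simp [lab, binDigits]
    | n + 2, _ =>
      rw [lab, binDigits]
      have hhalf : 1 ≤ (n + 2) / 2 := by omega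
      have hne := binDigits_ne_nil ((n + 2) / 2) hhalf
      rw [List.drop_append_of_le_length (by cases h : binDigits ((n+2)/2) with
            | nil => exact absurd h hne
            | cons a l => simp)]
      rw [List.map_append, ← ih ((n + 2) / 2) (by omega) hhalf]
      congr 1
      by_cases h : (n + 2) % 2 = 0 <;> simp [h] <;> omega

theorem solve_eq (A : Int) : solve A = solve_alt A := by
  by_cases hA : A ≤ 0
  · rw [solve, solve_alt, if_pos hA]
    simp only [PySem.List.pyRange_one_eq_nil (by omega : A ≤ 0)]
    rfl
  · rw [solve, solve_alt, if_neg hA]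
    simp only
    rw [foldl_const, PySem.List.length_pyRange_one]
    have hn : ∃ n : Nat, (A - 0).toNat = n + 1 := ⟨(A - 0).toNat - 1, by omega⟩
    obtain ⟨n, hn⟩ := hn
    rw [hn, iter_state]
    simp only [ansOf]
    have hA1 : (A + 1).toNat = n + 2 := by omega
    rw [hA1, lab_eq_binDigits (n + 2) (by omega)]

-- ===== VERDICT (by name: the statement is the Claim_ definition above) =====
theorem solve_spec : Claim_equal_solve := by
  intro A _
  show solve A = solve_alt A
  exact solve_eq A
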